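-- pv_equiv track=rewrite | github.com/jdinalt/forgather | src/forgather/ml/trainer/pipeline/pipeline_utils.py | pipeline_stage_indices
-- ===== SOURCE A (Python) =====
-- from typing import List, Tuple
--
-- def pipeline_stage_indices(
--     pp_size, n_stages, style: str = "loop"
-- ) -> List[Tuple[int, ...]]:
--     """
--     Get the stage indices for all ranks
--
--     See: https://github.com/pytorch/torchtitan/blob/main/torchtitan/distributed/pipeline.py#L194
--     """
--     stages_per_rank = n_stages // pp_size
--     match style:
--         case "loop":
--             assert (
--                 n_stages % pp_size == 0
--             ), f"n_stages {n_stages} must be divisible by pipeline size {pp_size}"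
--
--             stage_indices = list(
--                 tuple(rank + i * pp_size for i in range(stages_per_rank))
--                 for rank in range(pp_size)
--             )
--         case "v":
--             # Sanity check that all of the computed indices are valid
--             assert stages_per_rank == 2
--
--             stage_indices = list(
--                 tuple(
--                     x for x in zip(range(pp_size), range(n_stages - 1, pp_size - 1, -1))
--                 )
--             )
--
--         case _:
--             raise Exception(f"Unrecognized indices styel {style}")
--
--     return stage_indices
-- ===== SOURCE B (Python) =====
-- def pipeline_stage_indices(pp_size, n_stages, style: str = "loop"):
--     """Get the stage indices for all ranks (round-robin scatter formulation)."""
--     match style: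
--         case "loop":
--             assert (
--                 n_stages % pp_size == 0
--             ), f"n_stages {n_stages} must be divisible by pipeline size {pp_size}"
--             # one scatter pass: stage s goes to bucket s % pp_size
--             buckets = {}
--             for s in range(n_stages):
--                 buckets.setdefault(s % pp_size, []).append(s)
--             stage_indices = [tuple(buckets.get(rank, ())) for rank in range(pp_size)]
--         case "v":
--             assert n_stages // pp_size == 2
--             # closed form: rank i owns stages i and n_stages - 1 - i
--             stage_indices = [(i, n_stages - 1 - i) for i in range(pp_size)]
--         case _:
--             raise Exception(f"Unrecognized indices styel {style}")
--     return stage_indices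
-- ===== Notes on version B (the rewrite author's own statement) =====
-- stated objective: alternative
-- what changed: The loop branch nested per-rank comprehension is replaced by a single round-robin scatter pass (a dict of buckets keyed by s % pp_size, then gathered per rank), and the v branch zip of two ranges is replaced by the closed form (i, n_stages-1-i).
import Mathlib
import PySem

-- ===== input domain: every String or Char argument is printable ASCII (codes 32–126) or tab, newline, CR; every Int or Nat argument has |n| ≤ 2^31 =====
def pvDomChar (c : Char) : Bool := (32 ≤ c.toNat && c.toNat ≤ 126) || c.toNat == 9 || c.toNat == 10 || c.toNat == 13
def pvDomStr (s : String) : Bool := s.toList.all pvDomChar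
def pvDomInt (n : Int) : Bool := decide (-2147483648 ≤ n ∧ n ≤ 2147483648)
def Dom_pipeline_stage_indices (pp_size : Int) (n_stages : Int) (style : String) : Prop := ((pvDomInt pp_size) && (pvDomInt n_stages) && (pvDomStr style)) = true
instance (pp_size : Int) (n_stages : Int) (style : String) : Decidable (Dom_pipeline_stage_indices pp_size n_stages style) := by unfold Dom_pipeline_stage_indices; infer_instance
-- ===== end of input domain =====

-- B replaces the 'loop' branch's nested per-rank comprehension by one round-robin scatter pass
-- into buckets (and the 'v' zip by its closed form); same return value wherever A returns.

-- ===== PORT A =====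
def pipeline_stage_indices (pp_size : Int) (n_stages : Int) (style : String) : List (List Int) :=
  let stages_per_rank := PySem.Int.floordiv n_stages pp_size
  if style == "loop" then
    -- assert n_stages % pp_size == 0 (failure excluded by Pre_)
    (PySem.List.pyRange 0 pp_size 1).map (fun rank =>
      (PySem.List.pyRange 0 stages_per_rank 1).map (fun i => rank + i * pp_size))
  else if style == "v" then
    -- assert stages_per_rank == 2 (failure excluded by Pre_)
    ((PySem.List.pyRange 0 pp_size 1).zip
        (PySem.List.pyRange (n_stages - 1) (pp_size - 1) (-1))).map (fun p => [p.1, p.2])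
  else
    []  -- raise Exception (excluded by Pre_)

-- ===== PORT B =====
def pipeline_stage_indices_alt (pp_size : Int) (n_stages : Int) (style : String) : List (List Int) :=
  if style == "loop" then
    -- assert n_stages % pp_size == 0 (failure excluded by Pre_)
    -- buckets.setdefault(s % pp_size, []).append(s) = modify key [] (· ++ [s])
    let buckets : PySem.Dict Int (List Int) :=
      (PySem.List.pyRange 0 n_stages 1).foldl
        (fun d s => d.modify (PySem.Int.mod s pp_size) [] (· ++ [s])) PySem.Dict.empty
    (PySem.List.pyRange 0 pp_size 1).map (fun rank => buckets.getD rank [])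
  else if style == "v" then
    -- assert n_stages // pp_size == 2 (failure excluded by Pre_)
    (PySem.List.pyRange 0 pp_size 1).map (fun i => [i, n_stages - 1 - i])
  else
    []  -- raise Exception (excluded by Pre_)

-- ===== PRECONDITION & SPEC =====
-- Pre_ is exactly where A returns: pp_size ≠ 0 (else ZeroDivisionError) and the chosen style's
-- assert passes; any other style raises.
def Pre_pipeline_stage_indices (pp_size : Int) (n_stages : Int) (style : String) : Prop :=
  pp_size ≠ 0 ∧
    ((style = "loop" ∧ PySem.Int.mod n_stages pp_size = 0) ∨
     (style = "v" ∧ PySem.Int.floordiv n_stages pp_size = 2))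
instance (pp_size : Int) (n_stages : Int) (style : String) : Decidable (Pre_pipeline_stage_indices pp_size n_stages style) := by unfold Pre_pipeline_stage_indices; infer_instance
def pvWitness_pipeline_stage_indices : Int × Int × String := (2, 4, "loop")
def Spec_pipeline_stage_indices (pp_size : Int) (n_stages : Int) (style : String) (out : List (List Int)) : Prop := out = pipeline_stage_indices_alt pp_size n_stages style
instance (pp_size : Int) (n_stages : Int) (style : String) (out : List (List Int)) : Decidable (Spec_pipeline_stage_indices pp_size n_stages style out) := by unfold Spec_pipeline_stage_indices; infer_instance

-- ===== CLAIM (what is proved, stated in full; the proofs are below) =====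
def Claim_equal_pipeline_stage_indices : Prop := ∀ (pp_size : Int) (n_stages : Int) (style : String), Dom_pipeline_stage_indices pp_size n_stages style → Pre_pipeline_stage_indices pp_size n_stages style → Spec_pipeline_stage_indices pp_size n_stages style (pipeline_stage_indices pp_size n_stages style)

-- ===== LEMMAS AND PROOFS =====

theorem filter_range_eq (c m : Nat) (h : c < m) :
    (List.range m).filter (fun t => t == c) = [c] := by
  induction m with
  | zero => omega
  | succ m ih =>
    rw [List.range_succ, List.filter_append]
    by_cases hc : c < m
    · rw [ih hc]
      have : m ≠ c := by omega
      simp [this]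
    · have hcm : c = m := by omega
      subst hcm
      have : (List.range c).filter (fun t => t == c) = [] := by
        apply List.filter_eq_nil_iff.mpr
        intro t ht
        simp at ht ⊢
        omega
      simp [this]

theorem filter_block (pp r k : Int) (hpp : 0 < pp) (hr0 : 0 ≤ r) (hr : r < pp) :
    (PySem.List.pyRange (k * pp) (k * pp + pp) 1).filter
        (fun s => PySem.Int.mod s pp == r) = [k * pp + r] := by
  rw [PySem.List.pyRange_one]
  have hb : (k * pp + pp - k * pp).toNat = pp.toNat := by omega
  rw [hb, List.filter_map]
  have hcong : (List.range pp.toNat).filter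
      ((fun s => PySem.Int.mod s pp == r) ∘ (fun t : Nat => k * pp + (t : Int)))
      = (List.range pp.toNat).filter (fun t => t == r.toNat) := by
    apply List.filter_congr
    intro t ht
    simp only [List.mem_range] at ht
    have ht' : (t : Int) < pp := by omega
    have hmod : PySem.Int.mod (k * pp + (t : Int)) pp = (t : Int) := by
      rw [PySem.Int.mod_eq_emod_of_pos hpp]
      rw [Int.add_comm]
      simp [Int.add_mul_emod_self_right]
      exact Int.emod_eq_of_lt (by omega) ht'
    simp only [Function.comp, hmod]
    by_cases he : (t : Int) = r
    · have : t = r.toNat := by omega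
      simp [this]
      omega
    · have : t ≠ r.toNat := by omega
      simp [he, this]
  rw [hcong, filter_range_eq r.toNat pp.toNat (by omega)]
  simp
  omega

theorem filter_mult (pp r : Int) (hpp : 0 < pp) (hr0 : 0 ≤ r) (hr : r < pp) (k : Nat) :
    (PySem.List.pyRange 0 ((k : Int) * pp) 1).filter (fun s => PySem.Int.mod s pp == r)
      = (PySem.List.pyRange 0 (k : Int) 1).map (fun i => r + i * pp) := by
  induction k with
  | zero => simp [PySem.List.pyRange_one_eq_nil]
  | succ k ih =>
    have h1 : ((k + 1 : Nat) : Int) * pp = (k : Int) * pp + pp := by push_cast; ring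
    have h2 : ((k + 1 : Nat) : Int) = (k : Int) + 1 := by push_cast; ring
    rw [h1, h2]
    rw [PySem.List.pyRange_one_append 0 ((k : Int) * pp) ((k : Int) * pp + pp)
      (by positivity) (by omega)]
    rw [List.filter_append, ih, filter_block pp r k hpp hr0 hr]
    rw [PySem.List.pyRange_one_succ_right (by positivity)]
    rw [List.map_append]
    simp [add_comm, mul_comm]

-- B's bucket r is the filter of range(n_stages) by s % pp_size == r
theorem bucket_eq (pp n r : Int) :
    ((PySem.List.pyRange 0 n 1).foldl
        (fun d s => d.modify (PySem.Int.mod s pp) [] (· ++ [s]))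
        (PySem.Dict.empty : PySem.Dict Int (List Int))).getD r []
      = (PySem.List.pyRange 0 n 1).filter (fun s => PySem.Int.mod s pp == r) := by
  have h : (PySem.List.pyRange 0 n 1).foldl
        (fun d s => d.modify (PySem.Int.mod s pp) [] (· ++ [s]))
        (PySem.Dict.empty : PySem.Dict Int (List Int))
      = ((PySem.List.pyRange 0 n 1).map (fun s => (PySem.Int.mod s pp, s))).foldl
        (fun d p => d.modify p.1 [] (· ++ [p.2])) PySem.Dict.empty := by
    rw [List.foldl_map]
  rw [h, PySem.Dict.getD_foldl_modify_append, List.filter_map]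
  simp [Function.comp_def]

theorem loop_eq (pp n : Int) (hpp : pp ≠ 0) (hdvd : PySem.Int.mod n pp = 0) :
    pipeline_stage_indices pp n "loop" = pipeline_stage_indices_alt pp n "loop" := by
  unfold pipeline_stage_indices pipeline_stage_indices_alt
  simp only [beq_self_eq_true, if_pos]
  rcases lt_or_gt_of_ne hpp with hneg | hpos
  · rw [show PySem.List.pyRange 0 pp 1 = [] from PySem.List.pyRange_one_eq_nil (by omega)]
    simp
  · apply List.map_congr_left
    intro r hrmem
    rw [PySem.List.mem_pyRange_one] at hrmem
    rw [bucket_eq]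
    symm
    have hn : PySem.Int.floordiv n pp * pp = n := by
      have := PySem.Int.floordiv_mul_add_mod n pp
      omega
    by_cases hq : 0 ≤ PySem.Int.floordiv n pp
    · have hk : ((PySem.Int.floordiv n pp).toNat : Int) = PySem.Int.floordiv n pp := by omega
      calc (PySem.List.pyRange 0 n 1).filter (fun s => PySem.Int.mod s pp == r)
          = (PySem.List.pyRange 0 (((PySem.Int.floordiv n pp).toNat : Int) * pp) 1).filter
              (fun s => PySem.Int.mod s pp == r) := by rw [hk, hn]
        _ = (PySem.List.pyRange 0 ((PySem.Int.floordiv n pp).toNat : Int) 1).map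
              (fun i => r + i * pp) := filter_mult pp r hpos hrmem.1 hrmem.2 _
        _ = _ := by rw [hk]
    · have hq' : PySem.Int.floordiv n pp < 0 := by omega
      have hn0 : n < 0 := by nlinarith
      rw [show PySem.List.pyRange 0 n 1 = [] from PySem.List.pyRange_one_eq_nil (by omega),
          show PySem.List.pyRange 0 (PySem.Int.floordiv n pp) 1 = [] from
            PySem.List.pyRange_one_eq_nil (by omega)]
      simp

theorem v_eq (pp n : Int) (hpp : pp ≠ 0) (hq : PySem.Int.floordiv n pp = 2) :
    pipeline_stage_indices pp n "v" = pipeline_stage_indices_alt pp n "v" := by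
  unfold pipeline_stage_indices pipeline_stage_indices_alt
  simp only [beq_self_eq_true, if_pos]
  norm_num
  rcases lt_or_gt_of_ne hpp with hneg | hpos
  · rw [show PySem.List.pyRange 0 pp 1 = [] from PySem.List.pyRange_one_eq_nil (by omega)]
    simp
  · have hb : 2 * pp ≤ n ∧ n < (2 + 1) * pp := by
      rw [← PySem.Int.floordiv_eq_iff_of_pos hpos]
      exact hq
    rw [PySem.List.pyRange_one, PySem.List.pyRange_neg_one]
    apply List.ext_getElem
    · simp
      omega
    · intro i h1 h2
      simp [List.getElem_zip]

-- ===== VERDICT (by name: the statement is the Claim_ definition above) =====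
theorem pipeline_stage_indices_spec : Claim_equal_pipeline_stage_indices := by
  intro pp n style _ hpre
  unfold Spec_pipeline_stage_indices
  rcases hpre with ⟨hpp, hc | hc⟩
  · rcases hc with ⟨hs, hd⟩; subst hs; exact loop_eq pp n hpp hd
  · rcases hc with ⟨hs, hd⟩; subst hs; exact v_eq pp n hpp hd
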